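-- pv_equiv track=rewrite | github.com/chubkey3/Computer-Programming-11 | Memory_Game/Memory Game/memory.py | get_median_factors
-- ===== SOURCE A (Python) =====
-- def get_median_factors(x):
--     '''function used to return median factors of an int to create window with custom dimensions. e.g. 12 would be 3 and 4'''
--     fac = []
--     for i in range(1, x + 1):
--         if x % i == 0:
--             fac.append(i)
--     if len(fac) % 2 == 0: #even?
--         return(fac[(len(fac)//2)-1], fac[(len(fac)//2)])#return two center factors to create window (even)
--     else:
--         return(fac[(len(fac)//2)-1], fac[(len(fac)//2)+1])#return two center factors to create window (odd)
-- ===== SOURCE B (Python) =====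
-- def get_median_factors(x):
--     '''Same pair as the original, found in O(sqrt(x)): collect the divisors of x
--     up to its square root; the answer is (m, x // m) where m is the largest
--     collected divisor, or the one before it if x is a perfect square.'''
--     small = []
--     i = 1
--     while i * i <= x:
--         if x % i == 0:
--             small.append(i)
--         i += 1
--     m = small[-2] if small[-1] * small[-1] == x else small[-1]
--     return (m, x // m)
-- ===== Notes on version B (the rewrite author's own statement) =====
-- stated objective: faster
-- what changed: Instead of enumerating all of 1..x to build the full divisor list and indexing its middle, B collects only the divisors up to sqrt(x) and returns (m, x//m) where m is the largest collected divisor (the one before it when x is a perfect square), which equals A's middle pair in both parity cases.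
-- outside the precondition, e.g. on get_median_factors(1): A raises IndexError, B raises IndexError
import Mathlib
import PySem

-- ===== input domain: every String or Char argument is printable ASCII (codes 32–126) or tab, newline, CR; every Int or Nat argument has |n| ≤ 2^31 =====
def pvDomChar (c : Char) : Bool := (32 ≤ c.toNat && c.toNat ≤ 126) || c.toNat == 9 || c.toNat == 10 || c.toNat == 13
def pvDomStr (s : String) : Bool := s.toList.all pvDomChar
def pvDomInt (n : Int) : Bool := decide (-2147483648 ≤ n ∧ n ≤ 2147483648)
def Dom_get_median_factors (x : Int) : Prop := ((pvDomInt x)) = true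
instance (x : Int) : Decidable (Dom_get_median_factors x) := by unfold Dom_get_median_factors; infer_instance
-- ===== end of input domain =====

-- B collects only the divisors up to sqrt(x) and reads the answer off their tail,
-- instead of enumerating 1..x; a timing run measures whether that is faster.

-- ===== PORT A =====
-- fac[...] raises IndexError exactly when x ≤ 1 (excluded by Pre_); the '.getD 0'
-- default only fires there.
def get_median_factors (x : Int) : Int × Int :=
  let fac : List Int :=
    (PySem.List.pyRange 1 (x + 1) 1).foldl
      (fun acc i => if PySem.Int.mod x i == 0 then acc ++ [i] else acc) []
  let n : Int := fac.length
  if PySem.Int.mod n 2 == 0 then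
    ((PySem.List.pyGet? fac (PySem.Int.floordiv n 2 - 1)).getD 0,
     (PySem.List.pyGet? fac (PySem.Int.floordiv n 2)).getD 0)
  else
    ((PySem.List.pyGet? fac (PySem.Int.floordiv n 2 - 1)).getD 0,
     (PySem.List.pyGet? fac (PySem.Int.floordiv n 2 + 1)).getD 0)

-- ===== PORT B =====
-- while i * i <= x: if x % i == 0: small.append(i); i += 1
def altLoop (x i : Int) (small : List Int) : List Int :=
  if _h : i * i ≤ x then
    altLoop x (i + 1) (if PySem.Int.mod x i == 0 then small ++ [i] else small)
  else small
termination_by (x + 1 - i).toNat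
decreasing_by
  have h0 : i ≤ x := by
    by_cases h1 : i ≤ 1
    · nlinarith [mul_self_nonneg i]
    · nlinarith
  omega

-- small[-1]/small[-2] raise IndexError exactly when x ≤ 1 (excluded by Pre_);
-- the '.getD 0' default only fires there.
def get_median_factors_alt (x : Int) : Int × Int :=
  let small := altLoop x 1 []
  let m : Int :=
    if (PySem.List.pyGet? small (-1)).getD 0 * (PySem.List.pyGet? small (-1)).getD 0 == x
    then (PySem.List.pyGet? small (-2)).getD 0
    else (PySem.List.pyGet? small (-1)).getD 0
  (m, PySem.Int.floordiv x m)

-- ===== PRECONDITION & SPEC =====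
-- Both programs raise IndexError for every x ≤ 1 (A's factor list is empty, or
-- [1] with the odd branch reading fac[1]); Pre_ admits exactly the x on which
-- the Python A returns.
def Pre_get_median_factors (x : Int) : Prop := 2 ≤ x
instance (x : Int) : Decidable (Pre_get_median_factors x) := by
  unfold Pre_get_median_factors; infer_instance

def pvWitness_get_median_factors : Int := 12

def Spec_get_median_factors (x : Int) (out : Int × Int) : Prop :=
  out = get_median_factors_alt x
instance (x : Int) (out : Int × Int) : Decidable (Spec_get_median_factors x out) := by
  unfold Spec_get_median_factors; infer_instance

-- ===== CLAIM (what is proved, stated in full; the proofs are below) =====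
def Claim_equal_get_median_factors : Prop :=
  ∀ (x : Int), Dom_get_median_factors x → Pre_get_median_factors x →
    Spec_get_median_factors x (get_median_factors x)

-- ===== LEMMAS AND PROOFS =====

-- The divisor list A builds: 1 ≤ d ≤ x with x % d == 0, ascending.
def divL (x : Int) : List Int :=
  (PySem.List.pyRange 1 (x + 1) 1).filter (fun i => PySem.Int.mod x i == 0)

-- the factor A's result is built from: divL[len//2 - 1]
def mA (x : Int) : Int := (divL x).getD ((divL x).length / 2 - 1) 0

lemma mem_divL {x d : Int} (hx : 2 ≤ x) : d ∈ divL x ↔ 1 ≤ d ∧ d ∣ x := by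
  simp only [divL, List.mem_filter, PySem.List.mem_pyRange_one, beq_iff_eq,
    PySem.Int.mod_eq_zero_iff_dvd]
  constructor
  · rintro ⟨⟨h1, _⟩, h3⟩; exact ⟨h1, h3⟩
  · rintro ⟨h1, h2⟩
    have := Int.le_of_dvd (by omega) h2
    exact ⟨⟨h1, by omega⟩, h2⟩

lemma pairwise_divL (x : Int) : (divL x).Pairwise (· < ·) :=
  (PySem.List.pairwise_lt_pyRange_one 1 (x + 1)).filter _

lemma nodup_divL (x : Int) : (divL x).Nodup :=
  (pairwise_divL x).imp (fun h => ne_of_lt h)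

lemma sorted_le_divL {x : Int} {i j : Nat} (hij : i ≤ j) (hj : j < (divL x).length) :
    (divL x)[i]'(by omega) ≤ (divL x)[j] := by
  rcases Nat.eq_or_lt_of_le hij with rfl | h
  · exact le_refl _
  · exact le_of_lt ((List.pairwise_iff_getElem.1 (pairwise_divL x)) i j (by omega) hj h)

lemma div_facts {x d : Int} (hx : 2 ≤ x) (h1 : 1 ≤ d) (hd : d ∣ x) :
    1 ≤ x / d ∧ x / d ∣ x ∧ x / (x / d) = d ∧ d * (x / d) = x := by
  obtain ⟨c, hc⟩ := hd
  have hc0 : 0 < c := by nlinarith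
  have hdiv : x / d = c := by rw [hc]; exact Int.mul_ediv_cancel_left c (by omega)
  refine ⟨by omega, ⟨d, by rw [hdiv, hc]; ring⟩, ?_, by rw [hdiv, hc]⟩
  rw [hdiv, hc]
  exact Int.mul_ediv_cancel d (by omega)

lemma div_antitone {x a b : Int} (hx : 2 ≤ x) (ha1 : 1 ≤ a) (had : a ∣ x)
    (hb1 : 1 ≤ b) (hbd : b ∣ x) (hab : a < b) : x / b < x / a := by
  obtain ⟨_, _, _, ha4⟩ := div_facts hx ha1 had
  obtain ⟨hb2, _, _, hb4⟩ := div_facts hx hb1 hbd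
  rcases lt_or_ge (x / b) (x / a) with h | h
  · exact h
  · exfalso; nlinarith

lemma mirror_divL {x : Int} (hx : 2 ≤ x) :
    ((divL x).reverse.map (fun d => x / d)) = divL x := by
  have hnd : ((divL x).reverse.map (fun d => x / d)).Nodup := by
    apply List.Nodup.map_on
    · intro a ha b hb hab
      obtain ⟨ha1, had⟩ := (mem_divL hx).1 (List.mem_reverse.1 ha)
      obtain ⟨hb1, hbd⟩ := (mem_divL hx).1 (List.mem_reverse.1 hb)
      have h3a := (div_facts hx ha1 had).2.2.1
      have h3b := (div_facts hx hb1 hbd).2.2.1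
      rw [← h3a, ← h3b, hab]
    · exact List.nodup_reverse.2 (nodup_divL x)
  have hperm : ((divL x).reverse.map (fun d => x / d)).Perm (divL x) := by
    apply List.perm_of_nodup_nodup_toFinset_eq hnd (nodup_divL x)
    ext a
    simp only [List.mem_toFinset, List.mem_map, List.mem_reverse]
    constructor
    · rintro ⟨b, hb, rfl⟩
      obtain ⟨hb1, hbd⟩ := (mem_divL hx).1 hb
      obtain ⟨h1, h2, _, _⟩ := div_facts hx hb1 hbd
      exact (mem_divL hx).2 ⟨h1, h2⟩
    · intro hd
      obtain ⟨hd1, hdd⟩ := (mem_divL hx).1 hd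
      obtain ⟨h1, h2, h3, _⟩ := div_facts hx hd1 hdd
      exact ⟨x / a, (mem_divL hx).2 ⟨h1, h2⟩, h3⟩
  have hsorted : ((divL x).reverse.map (fun d => x / d)).Pairwise (· < ·) := by
    rw [List.pairwise_map, List.pairwise_reverse]
    apply List.Pairwise.imp_of_mem (l := divL x)
      (R := fun a b => a < b) ?_ (pairwise_divL x)
    intro a b ha hb h
    obtain ⟨ha1, had⟩ := (mem_divL hx).1 ha
    obtain ⟨hb1, hbd⟩ := (mem_divL hx).1 hb
    exact div_antitone hx ha1 had hb1 hbd h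
  exact List.Perm.eq_of_pairwise
    (fun a b _ _ h1 h2 => absurd h1 (asymm h2)) hsorted (pairwise_divL x) hperm

lemma getElem_mirror_divL {x : Int} (hx : 2 ≤ x) {i : Nat} (hi : i < (divL x).length) :
    (divL x)[(divL x).length - 1 - i]'(by omega) = x / (divL x)[i] := by
  have h := mirror_divL hx
  have hidx : (divL x).length - 1 - ((divL x).length - 1 - i) = i := by omega
  calc (divL x)[(divL x).length - 1 - i]'(by omega)
      = ((divL x).reverse.map (fun d => x / d))[(divL x).length - 1 - i]'(by simp; omega) :=
        (List.getElem_of_eq h.symm _)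
    _ = x / (divL x).reverse[(divL x).length - 1 - i]'(by simp; omega) := by
        rw [List.getElem_map]
    _ = x / (divL x)[i] := by
        rw [List.getElem_reverse]
        simp only [hidx]

lemma getElem_mirror_divL' {x : Int} (hx : 2 ≤ x) {i j : Nat} (hi : i < (divL x).length)
    (hj : j < (divL x).length) (hij : i + j = (divL x).length - 1) :
    (divL x)[j] = x / (divL x)[i] := by
  have hje : j = (divL x).length - 1 - i := by omega
  subst hje
  exact getElem_mirror_divL hx hi

lemma two_le_length_divL {x : Int} (hx : 2 ≤ x) : 2 ≤ (divL x).length := by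
  have h1 : (1 : Int) ∈ divL x := (mem_divL hx).2 ⟨le_refl 1, one_dvd x⟩
  have h2 : x ∈ divL x := (mem_divL hx).2 ⟨by omega, dvd_refl x⟩
  rcases e : divL x with _ | ⟨a, l⟩
  · rw [e] at h1; simp at h1
  rcases l with _ | ⟨b, t⟩
  · rw [e] at h1 h2
    simp at h1 h2
    omega
  · simp

lemma mA_getElem {x : Int} (hx : 2 ≤ x) :
    mA x = (divL x)[(divL x).length / 2 - 1]'
      (by have := two_le_length_divL hx; omega) := by
  have hn2 := two_le_length_divL hx
  unfold mA
  rw [List.getD_eq_getElem?_getD, List.getElem?_eq_getElem (by omega)]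
  rfl

-- A's value, in closed form: A returns (mA x, x / mA x).
lemma A_eq {x : Int} (hx : 2 ≤ x) :
    get_median_factors x = (mA x, x / mA x) := by
  have hn2 : 2 ≤ (divL x).length := two_le_length_divL hx
  have hfold : ∀ acc : List Int, (PySem.List.pyRange 1 (x + 1) 1).foldl
      (fun acc i => if PySem.Int.mod x i == 0 then acc ++ [i] else acc) acc
      = acc ++ divL x := fun acc => PySem.List.foldl_append_if_eq_filter _ _ _
  have hc1 : (((divL x).length / 2 : Nat) : Int) - 1
      = (((divL x).length / 2 - 1 : Nat) : Int) := by omega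
  have hc2 : (((divL x).length / 2 : Nat) : Int) + 1
      = (((divL x).length / 2 + 1 : Nat) : Int) := by omega
  have hmodc : PySem.Int.mod ((divL x).length : Int) 2
      = (((divL x).length % 2 : Nat) : Int) := by
    rw [PySem.Int.mod_eq_emod_of_pos (by norm_num)]; omega
  have hdivc : PySem.Int.floordiv ((divL x).length : Int) 2
      = (((divL x).length / 2 : Nat) : Int) := by
    rw [PySem.Int.floordiv_eq_ediv_of_pos (by norm_num)]; omega
  unfold get_median_factors
  simp only [hfold, List.nil_append, hmodc, hdivc]
  rcases Nat.mod_two_eq_zero_or_one (divL x).length with hp | hp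
  · -- even length: the second index len/2 is the mirror of len/2 - 1
    have hmir : (divL x)[(divL x).length / 2]'(by omega) = x / mA x := by
      rw [mA_getElem hx]
      exact getElem_mirror_divL' hx (by omega) (by omega) (by omega)
    rw [if_pos (by simp [hp])]
    rw [hc1]
    rw [PySem.List.pyGet?_natCast, PySem.List.pyGet?_natCast]
    rw [List.getElem?_eq_getElem
        (by omega : (divL x).length / 2 - 1 < (divL x).length),
      List.getElem?_eq_getElem (by omega : (divL x).length / 2 < (divL x).length)]
    simp only [Option.getD_some]
    rw [hmir, mA_getElem hx]
  · -- odd length: index len/2 + 1 is the mirror of len/2 - 1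
    have hmir : (divL x)[(divL x).length / 2 + 1]'(by omega) = x / mA x := by
      rw [mA_getElem hx]
      exact getElem_mirror_divL' hx (by omega) (by omega) (by omega)
    rw [if_neg (by simp [hp])]
    rw [hc1, hc2]
    rw [PySem.List.pyGet?_natCast, PySem.List.pyGet?_natCast]
    rw [List.getElem?_eq_getElem
        (by omega : (divL x).length / 2 - 1 < (divL x).length),
      List.getElem?_eq_getElem (by omega : (divL x).length / 2 + 1 < (divL x).length)]
    simp only [Option.getD_some]
    rw [hmir, mA_getElem hx]

-- the chosen factor: a divisor below the square root, maximal such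
lemma m_facts {x : Int} (hx : 2 ≤ x) :
    1 ≤ mA x ∧ mA x ∣ x ∧ mA x * mA x < x ∧
      ∀ d, 1 ≤ d → d ∣ x → mA x < d → x ≤ d * d := by
  have hn2 := two_le_length_divL hx
  have hmem_m : mA x ∈ divL x := by
    rw [mA_getElem hx]; exact List.getElem_mem _
  obtain ⟨hm1, hmd⟩ := (mem_divL hx).1 hmem_m
  have hg_mem : (divL x)[(divL x).length / 2]'(by omega) ∈ divL x := List.getElem_mem _
  obtain ⟨hg1, hgd⟩ := (mem_divL hx).1 hg_mem
  have hmg : mA x < (divL x)[(divL x).length / 2]'(by omega) := by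
    rw [mA_getElem hx]
    exact (List.pairwise_iff_getElem.1 (pairwise_divL x)) _ _ (by omega) (by omega)
      (by omega)
  have hkey : mA x * (divL x)[(divL x).length / 2]'(by omega) ≤ x ∧
      x ≤ (divL x)[(divL x).length / 2]'(by omega) *
        (divL x)[(divL x).length / 2]'(by omega) := by
    rcases Nat.mod_two_eq_zero_or_one (divL x).length with hp | hp
    · -- even: L[len/2] = x / mA x
      have hmir : (divL x)[(divL x).length / 2]'(by omega) = x / mA x := by
        rw [mA_getElem hx]
        exact getElem_mirror_divL' hx (by omega) (by omega) (by omega)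
      have h4 := (div_facts hx hm1 hmd).2.2.2
      have h5 := (div_facts hx hm1 hmd).1
      have hmg' : mA x < x / mA x := by rw [← hmir]; exact hmg
      constructor
      · rw [hmir]; exact le_of_eq h4
      · rw [hmir]; nlinarith
    · -- odd: L[len/2] is its own mirror, so its square is x
      have hmir : (divL x)[(divL x).length / 2]'(by omega)
          = x / (divL x)[(divL x).length / 2]'(by omega) :=
        getElem_mirror_divL' hx (by omega) (by omega) (by omega)
      have h4 := (div_facts hx hg1 hgd).2.2.2
      rw [← hmir] at h4
      exact ⟨by nlinarith, h4.ge⟩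
  obtain ⟨hk1, hk2⟩ := hkey
  refine ⟨hm1, hmd, by nlinarith, ?_⟩
  intro d hd1 hdd hmd'
  obtain ⟨t, ht, rfl⟩ := List.mem_iff_getElem.1 ((mem_divL hx).2 ⟨hd1, hdd⟩)
  rcases Nat.lt_or_ge t ((divL x).length / 2) with hc | hht
  · exfalso
    have hle : (divL x)[t] ≤ (divL x)[(divL x).length / 2 - 1]'(by omega) :=
      sorted_le_divL (i := t) (j := (divL x).length / 2 - 1) (by omega) (by omega)
    rw [← mA_getElem hx] at hle
    omega
  · have hgle : (divL x)[(divL x).length / 2]'(by omega) ≤ (divL x)[t] :=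
      sorted_le_divL (i := (divL x).length / 2) (j := t) hht ht
    nlinarith

-- ===== the small-divisor list B builds =====

-- closed form of B's loop from counter i: divisors d ≥ i with d*d ≤ x, ascending
def G (x i : Int) : List Int :=
  (PySem.List.pyRange i (x + 1) 1).filter
    (fun d => PySem.Int.mod x d == 0 && decide (d * d ≤ x))

lemma altLoop_eq (x i : Int) (acc : List Int) :
    1 ≤ i → altLoop x i acc = acc ++ G x i := by
  induction i, acc using altLoop.induct (x := x) with
  | case1 i acc h ih =>
    intro hi
    have hix : i ≤ x := by
      by_cases h1 : i ≤ 1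
      · nlinarith [mul_self_nonneg i]
      · nlinarith
    rw [altLoop]; simp only [dif_pos h]
    simp only [dite_eq_ite] at ih
    rw [ih (by omega)]
    have hG : G x i = (if PySem.Int.mod x i == 0 then [i] else []) ++ G x (i + 1) := by
      unfold G
      rw [PySem.List.pyRange_one_cons (by omega)]
      rw [List.filter_cons]
      have : decide (i * i ≤ x) = true := by simpa using h
      rcases hm : (PySem.Int.mod x i == 0) with hm0 | hm1 <;> simp [this]
    rw [hG]
    split_ifs <;> simp
  | case2 i acc h =>
    intro hi
    rw [altLoop]; simp only [dif_neg h]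
    have hG : G x i = [] := by
      unfold G
      rw [List.filter_eq_nil_iff]
      intro d hd
      rw [PySem.List.mem_pyRange_one] at hd
      have : ¬ d * d ≤ x := by nlinarith [hd.1]
      simp [this]
    rw [hG, List.append_nil]

-- B's list is A's divisor list cut at the square root
lemma small_eq (x : Int) :
    altLoop x 1 [] = (divL x).filter (fun d => decide (d * d ≤ x)) := by
  rw [altLoop_eq x 1 [] (le_refl 1)]
  unfold G divL
  rw [List.nil_append, List.filter_filter]
  apply List.filter_congr
  intro d _
  rcases hm : (PySem.Int.mod x d == 0) <;> simp

-- ===== VERDICT (by name: the statement is the Claim_ definition above) =====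
theorem get_median_factors_spec : Claim_equal_get_median_factors := by
  intro x _ hpre
  have hx : 2 ≤ x := hpre
  show get_median_factors x = get_median_factors_alt x
  rw [A_eq hx]
  obtain ⟨hmA1, hmAd, hmA3, hmA4⟩ := m_facts hx
  -- the list B builds
  unfold get_median_factors_alt
  rw [small_eq x]
  set S : List Int := (divL x).filter (fun d => decide (d * d ≤ x)) with hS
  have hmemS : ∀ d : Int, d ∈ S ↔ 1 ≤ d ∧ d ∣ x ∧ d * d ≤ x := by
    intro d
    rw [hS, List.mem_filter, mem_divL hx]
    simp [and_assoc]
  have hpwS : S.Pairwise (· < ·) := (pairwise_divL x).filter _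
  have hsorted : ∀ {i j : Nat}, (hij : i ≤ j) → (hj : j < S.length) →
      S[i]'(Nat.lt_of_le_of_lt hij hj) ≤ S[j] := by
    intro i j hij hj
    rcases Nat.eq_or_lt_of_le hij with rfl | h
    · exact le_refl _
    · exact le_of_lt ((List.pairwise_iff_getElem.1 hpwS) i j (by omega) hj h)
  have h1S : (1 : Int) ∈ S := (hmemS 1).2 ⟨le_refl 1, one_dvd x, by omega⟩
  have hne : S ≠ [] := fun h => by simp [h] at h1S
  have hlen1 : 1 ≤ S.length := List.length_pos_iff.2 hne
  -- the last element: the largest divisor with d*d ≤ x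
  have hlast_mem : S[S.length - 1]'(by omega) ∈ S := List.getElem_mem _
  obtain ⟨hL1, hLd, hL2⟩ := (hmemS _).1 hlast_mem
  have hLmax : ∀ d ∈ S, d ≤ S[S.length - 1]'(by omega) := by
    intro d hd
    obtain ⟨t, ht, rfl⟩ := List.mem_iff_getElem.1 hd
    exact hsorted (by omega) (by omega)
  have hget1 : PySem.List.pyGet? S (-1) = some (S[S.length - 1]'(by omega)) := by
    rw [PySem.List.pyGet?_neg_ofNat S 1 (by omega) (by omega)]
    exact List.getElem?_eq_getElem (by omega)
  set L : Int := S[S.length - 1]'(by omega) with hLdef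
  simp only [hget1, Option.getD_some]
  by_cases hsq : L * L = x
  · -- x is a perfect square: m = S[-2], the largest divisor strictly below sqrt x
    rw [if_pos (by simpa using hsq)]
    -- mA ∈ S and mA < L
    have hmAS : mA x ∈ S := (hmemS _).2 ⟨hmA1, hmAd, by omega⟩
    have hmAL : mA x < L := by nlinarith
    have hL2' : 2 ≤ L := by nlinarith
    have hlen2 : 2 ≤ S.length := by
      obtain ⟨t, ht, h1e⟩ := List.mem_iff_getElem.1 h1S
      have htne : t ≠ S.length - 1 := by
        intro he; simp only [he] at h1e; rw [← hLdef] at h1e; omega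
      omega
    have hget2 : PySem.List.pyGet? S (-2) = some (S[S.length - 2]'(by omega)) := by
      rw [PySem.List.pyGet?_neg_ofNat S 2 (by omega) (by omega)]
      exact List.getElem?_eq_getElem (by omega)
    rw [hget2]
    simp only [Option.getD_some]
    -- second-to-last = mA
    have hs_mem : S[S.length - 2]'(by omega) ∈ S := List.getElem_mem _
    obtain ⟨hs1, hsd, hs2⟩ := (hmemS _).1 hs_mem
    have hsL : S[S.length - 2]'(by omega) < L :=
      (List.pairwise_iff_getElem.1 hpwS) _ _ (by omega) (by omega) (by omega)
    have hssq : S[S.length - 2]'(by omega) * S[S.length - 2]'(by omega) < x := by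
      nlinarith
    -- mA ≤ second-to-last: mA's index is below length-1
    obtain ⟨t, ht, hte⟩ := List.mem_iff_getElem.1 hmAS
    have htne : t ≠ S.length - 1 := by
      intro he; simp only [he] at hte; rw [← hLdef] at hte; omega
    have hmAle : mA x ≤ S[S.length - 2]'(by omega) := by
      rw [← hte]; exact hsorted (by omega) (by omega)
    have : S[S.length - 2]'(by omega) ≤ mA x := by
      rcases le_or_gt (S[S.length - 2]'(by omega)) (mA x) with hc | hc
      · exact hc
      · have := hmA4 _ hs1 hsd hc
        omega
    have hm_eq : S[S.length - 2]'(by omega) = mA x := le_antisymm this hmAle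
    rw [hm_eq, PySem.Int.floordiv_eq_ediv_of_pos (by omega)]
  · -- not a perfect square: m = L, and L = mA
    rw [if_neg (by simpa using hsq)]
    have hLlt : L * L < x := by omega
    have hLeq : L = mA x := by
      rcases lt_trichotomy L (mA x) with hlt | heq | hgt
      · have := hLmax _ ((hmemS _).2 ⟨hmA1, hmAd, by omega⟩); omega
      · exact heq
      · have := hmA4 _ hL1 hLd hgt; omega
    rw [hLeq, PySem.Int.floordiv_eq_ediv_of_pos (by omega)]
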